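-- pv_equiv track=rewrite | github.com/wulinlw/leetcode_cn | 剑指offer/65_不用加减乘除做加法.py | add
-- ===== SOURCE A (Python) =====
-- def add(a: int, b: int) -> int:
--     a &= 0xFFFFFFFF                         #二进制长度限制，取有效部分，题目要求的32位整数
--     b &= 0xFFFFFFFF
--     while b:
--         carry = a & b
--         a ^= b                              #异或，取不进位部分的和，不管进位
--         b = ((carry) << 1) & 0xFFFFFFFF     #取进位
--     return a if a < 0x80000000 else ~(a^0xFFFFFFFF)
-- ===== SOURCE B (Python) =====
-- def add(a: int, b: int) -> int:
--     s = (a + b) & 0xFFFFFFFF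
--     return s if s < 0x80000000 else s - 0x100000000
-- ===== Notes on version B (the rewrite author's own statement) =====
-- stated objective: simpler
-- what changed: Replaces the carry-propagation xor/and loop with a single closed-form masked addition plus signed reinterpretation of the low 32 bits.
import Mathlib
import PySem

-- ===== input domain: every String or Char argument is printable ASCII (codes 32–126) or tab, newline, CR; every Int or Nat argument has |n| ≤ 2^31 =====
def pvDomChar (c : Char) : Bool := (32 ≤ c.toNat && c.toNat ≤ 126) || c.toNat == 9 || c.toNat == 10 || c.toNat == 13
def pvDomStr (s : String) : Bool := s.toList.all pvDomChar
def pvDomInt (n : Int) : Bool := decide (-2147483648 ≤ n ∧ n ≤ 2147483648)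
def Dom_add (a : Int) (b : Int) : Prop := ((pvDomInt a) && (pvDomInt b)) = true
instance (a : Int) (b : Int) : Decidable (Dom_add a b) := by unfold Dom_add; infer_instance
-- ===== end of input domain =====

-- B replaces A's carry-propagation xor/and loop by one closed-form masked addition (simpler).

-- ===== PORT A =====
-- Python's while loop, made structurally recursive with a fuel of 33 iterations; the fuel
-- is only a totality guard: for 32-bit-masked operands the carry word gains one trailing
-- zero bit per iteration (proved below), so the loop always exits before the fuel runs out.
def addLoop : Nat → Int → Int → Int
  | 0, a, _ => a
  | fuel+1, a, b =>
    if b ≠ 0 then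
      let carry := PySem.Int.band a b
      let a' := PySem.Int.bxor a b
      let b' := PySem.Int.band (carry <<< (1:Nat)) 0xFFFFFFFF
      addLoop fuel a' b'
    else a

def add (a : Int) (b : Int) : Int :=
  let a1 := PySem.Int.band a 0xFFFFFFFF
  let b1 := PySem.Int.band b 0xFFFFFFFF
  let r := addLoop 33 a1 b1
  if r < 0x80000000 then r else Int.not (PySem.Int.bxor r 0xFFFFFFFF)

-- ===== PORT B =====
def add_alt (a : Int) (b : Int) : Int :=
  let s := PySem.Int.band (a + b) 0xFFFFFFFF
  if s < 0x80000000 then s else s - 0x100000000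

-- ===== PRECONDITION & SPEC =====
def Spec_add (a : Int) (b : Int) (out : Int) : Prop := out = add_alt a b
instance (a : Int) (b : Int) (out : Int) : Decidable (Spec_add a b out) := by unfold Spec_add; infer_instance

-- ===== CLAIM (what is proved, stated in full; the proofs are below) =====
def Claim_equal_add : Prop := ∀ (a : Int) (b : Int), Dom_add a b → Spec_add a b (add a b)

-- ===== LEMMAS AND PROOFS =====

-- (a & b) % 2, in terms of the parities of a and b
lemma and_mod_two (a b : ℕ) : (a &&& b) % 2 = a % 2 * (b % 2) := by
  have h1 : ∀ x : ℕ, x &&& 1 = x % 2 := fun x => by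
    simp [Nat.and_two_pow_sub_one_eq_mod x 1]
  rw [show (a &&& b) % 2 = (a &&& b) &&& 1 from (h1 _).symm, Nat.and_assoc, h1 b]
  rcases Nat.mod_two_eq_zero_or_one b with hb | hb <;> rw [hb]
  · simp
  · rw [h1 a]; simp

-- the fundamental carry identity: a + b = (a xor b) + 2 * (a and b)
lemma add_eq_xor_add_two_and (a b : ℕ) : a + b = (a ^^^ b) + 2 * (a &&& b) := by
  induction a using Nat.strong_induction_on generalizing b with
  | _ a ih =>
    rcases Nat.eq_zero_or_pos a with rfl | hpos
    · simp
    · have ih2 := ih (a / 2) (by omega) (b / 2)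
      have hx : (a ^^^ b) / 2 = a / 2 ^^^ b / 2 := Nat.xor_div_two
      have hxa : (a ^^^ b) % 2 = (a + b) % 2 := Nat.xor_mod_two_eq
      have hnd : (a &&& b) / 2 = a / 2 &&& b / 2 := Nat.and_div_two
      have hnm : (a &&& b) % 2 = a % 2 * (b % 2) := and_mod_two a b
      rcases Nat.mod_two_eq_zero_or_one a with ha | ha <;>
        rcases Nat.mod_two_eq_zero_or_one b with hb | hb <;>
        rw [ha, hb] at hnm <;> omega

-- a power of two dividing b divides a and b
lemma two_pow_dvd_and (k : ℕ) : ∀ a b : ℕ, 2 ^ k ∣ b → 2 ^ k ∣ a &&& b := by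
  induction k with
  | zero => intro a b _; simp
  | succ k ih =>
    intro a b hb
    obtain ⟨c, rfl⟩ := hb
    have hsplit : 2 ^ (k+1) * c = 2 * (2 ^ k * c) := by ring
    have hb2 : (2 ^ (k+1) * c) % 2 = 0 := by omega
    have hbd : (2 ^ (k+1) * c) / 2 = 2 ^ k * c := by omega
    have h1 := ih (a / 2) ((2 ^ (k+1) * c) / 2) (by rw [hbd]; exact dvd_mul_right _ _)
    have h2 : (a &&& 2 ^ (k+1) * c) / 2 = a / 2 &&& (2 ^ (k+1) * c) / 2 := Nat.and_div_two
    have h3 : (a &&& 2 ^ (k+1) * c) % 2 = a % 2 * ((2 ^ (k+1) * c) % 2) := and_mod_two _ _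
    rw [hb2, Nat.mul_zero] at h3
    obtain ⟨d, hd⟩ := h1
    refine ⟨d, ?_⟩
    have e1 : a &&& 2 ^ (k+1) * c = 2 * ((a &&& 2 ^ (k+1) * c) / 2) := by omega
    rw [e1, h2, hd]; ring

-- xor with an all-ones mask is subtraction from the mask
lemma xor_mask (n : ℕ) : ∀ r : ℕ, r < 2 ^ n → r ^^^ (2 ^ n - 1) = 2 ^ n - 1 - r := by
  induction n with
  | zero => intro r hr; interval_cases r; rfl
  | succ n ih =>
    intro r hr
    have h2 : (2:ℕ) ^ (n+1) = 2 * 2 ^ n := by ring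
    have h1 : (1:ℕ) ≤ 2 ^ n := Nat.one_le_two_pow
    have hm : (2 ^ (n+1) - 1) / 2 = 2 ^ n - 1 := by omega
    have hx : (r ^^^ (2 ^ (n+1) - 1)) / 2 = r / 2 ^^^ (2 ^ (n+1) - 1) / 2 := Nat.xor_div_two
    have hxm : (r ^^^ (2 ^ (n+1) - 1)) % 2 = (r + (2 ^ (n+1) - 1)) % 2 := Nat.xor_mod_two_eq
    rw [hm] at hx
    have hih := ih (r / 2) (by omega)
    omega

-- masking with 0xFFFFFFFF is (Python's) mod 2^32, for every integer
lemma band_mask (x : Int) : PySem.Int.band x 0xFFFFFFFF = x % 4294967296 := by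
  rcases x with n | n
  · show PySem.Int.band ((n : ℕ) : Int) ((4294967295 : ℕ) : Int) = ((n : ℕ) : Int) % 4294967296
    rw [PySem.Int.band_natCast]
    have h : (4294967295 : ℕ) = 2 ^ 32 - 1 := rfl
    rw [h, Nat.and_two_pow_sub_one_eq_mod]
    omega
  · have hneg : ¬ (0 : Int) ≤ Int.negSucc n := by
      rw [Int.negSucc_eq]; omega
    have hm : (-(Int.negSucc n) - 1).toNat = n := by
      rw [Int.negSucc_eq]; omega
    simp only [PySem.Int.band, if_neg hneg, if_pos (by norm_num : (0:Int) ≤ 0xFFFFFFFF)]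
    rw [hm]
    have hand : (0xFFFFFFFF : Int).toNat &&& n = n % 4294967296 := by
      have ht : (0xFFFFFFFF : Int).toNat = 4294967295 := rfl
      rw [ht, Nat.and_comm]
      have h : (4294967295 : ℕ) = 2 ^ 32 - 1 := rfl
      rw [h, Nat.and_two_pow_sub_one_eq_mod]
    rw [hand]
    have hns : Int.negSucc n = -(n : Int) - 1 := by rw [Int.negSucc_eq]; ring
    rw [hns]
    have hcast : ((4294967295 - n % 4294967296 : ℕ) : Int) = 4294967295 - ((n % 4294967296 : ℕ) : Int) := by
      have : n % 4294967296 ≤ 4294967295 := by omega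
      omega
    omega

-- one unfolding of the loop body when b is nonzero
lemma addLoop_step (fuel : ℕ) (a b : Int) (h : b ≠ 0) :
    addLoop (fuel+1) a b
      = addLoop fuel (PySem.Int.bxor a b)
          (PySem.Int.band ((PySem.Int.band a b) <<< (1:Nat)) 0xFFFFFFFF) := by
  simp only [addLoop, if_pos h]

-- the loop computes (a + b) mod 2^32 whenever its carry argument has enough trailing zeros
lemma addLoop_eq : ∀ (fuel : ℕ) (a b : ℕ), a < 2 ^ 32 → b < 2 ^ 32 → 2 ^ (33 - fuel) ∣ b →
    addLoop fuel (a : Int) (b : Int) = (((a + b) % 2 ^ 32 : ℕ) : Int) := by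
  intro fuel
  induction fuel with
  | zero =>
    intro a b ha hb hd
    have hb0 : b = 0 := Nat.eq_zero_of_dvd_of_lt hd (lt_trans hb (by norm_num))
    subst hb0
    have hz : (a + 0) % 2 ^ 32 = a := by omega
    rw [hz]
    rfl
  | succ fuel ih =>
    intro a b ha hb hd
    by_cases hb0 : b = 0
    · subst hb0
      have hz : (a + 0) % 2 ^ 32 = a := by omega
      rw [hz]
      simp [addLoop]
    · have hbI : (b : Int) ≠ 0 := by exact_mod_cast hb0
      rw [addLoop_step fuel (a : Int) (b : Int) hbI]
      rw [PySem.Int.band_natCast, PySem.Int.bxor_natCast]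
      rw [show ((a &&& b : ℕ) : Int) <<< (1:Nat) = (((a &&& b) <<< 1 : ℕ) : Int) from
        (Int.natCast_shiftLeft _ _).symm]
      rw [band_mask]
      have hshift : ((a &&& b) <<< 1 : ℕ) = 2 * (a &&& b) := by
        rw [Nat.shiftLeft_eq]; ring
      rw [hshift]
      have hemod : ((2 * (a &&& b) : ℕ) : Int) % 4294967296
          = (((2 * (a &&& b)) % 4294967296 : ℕ) : Int) := by push_cast; omega
      rw [hemod]
      -- the carry has at least 33 - (fuel+1) trailing zero bits; one more after the shift
      have hdvd32 : 2 ^ (32 - fuel) ∣ b := by simpa using hd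
      have hfuel1 : 1 ≤ fuel := by
        by_contra hf
        have : fuel = 0 := by omega
        subst this
        simp only [Nat.sub_zero] at hdvd32
        have := Nat.eq_zero_of_dvd_of_lt hdvd32 hb
        exact hb0 this
      have hdand : 2 ^ (32 - fuel) ∣ a &&& b := two_pow_dvd_and _ a b hdvd32
      have hdnext : 2 ^ (33 - fuel) ∣ (2 * (a &&& b)) % 4294967296 := by
        obtain ⟨c, hc⟩ := hdand
        have hdd : 2 ^ (33 - fuel) ∣ 2 * (a &&& b) := by
          by_cases hf : fuel ≤ 32
          · exact ⟨c, by rw [hc, show 33 - fuel = (32 - fuel) + 1 from by omega]; ring⟩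
          · rw [show 33 - fuel = 0 from by omega, pow_zero]
            exact one_dvd _
        have hdvdN : 2 ^ (33 - fuel) ∣ 4294967296 := by
          rw [show (4294967296 : ℕ) = 2 ^ 32 from by norm_num]
          exact pow_dvd_pow 2 (by omega)
        exact (Nat.dvd_mod_iff hdvdN).mpr hdd
      have hlt : (2 * (a &&& b)) % 4294967296 < 2 ^ 32 := by
        have : (4294967296 : ℕ) = 2 ^ 32 := by norm_num
        omega
      rw [ih (a ^^^ b) ((2 * (a &&& b)) % 4294967296) (Nat.xor_lt_two_pow ha hb) hlt hdnext]
      have hkey := add_eq_xor_add_two_and a b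
      have h32 : (2:ℕ) ^ 32 = 4294967296 := by norm_num
      congr 1
      omega

-- ===== VERDICT (by name: the statement is the Claim_ definition above) =====
theorem add_spec : Claim_equal_add := by
  intro a b hdom
  have hdom' : -2147483648 ≤ a ∧ a ≤ 2147483648 ∧ -2147483648 ≤ b ∧ b ≤ 2147483648 := by
    unfold Dom_add pvDomInt at hdom
    simp at hdom
    omega
  unfold Spec_add add add_alt
  dsimp only
  rw [band_mask a, band_mask b, band_mask (a + b)]
  set na := (a % 4294967296).toNat with hna
  set nb := (b % 4294967296).toNat with hnb
  have hae : a % 4294967296 = (na : Int) := by omega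
  have hbe : b % 4294967296 = (nb : Int) := by omega
  have hna_lt : na < 2 ^ 32 := by omega
  have hnb_lt : nb < 2 ^ 32 := by omega
  rw [hae, hbe, addLoop_eq 33 na nb hna_lt hnb_lt (by simp)]
  set r := (na + nb) % 2 ^ 32 with hr
  have hr_lt : r < 2 ^ 32 := by omega
  have hsum : (a + b) % 4294967296 = ((r : ℕ) : Int) := by omega
  rw [hsum]
  have hxor : PySem.Int.bxor ((r : ℕ) : Int) 0xFFFFFFFF = ((2 ^ 32 - 1 - r : ℕ) : Int) := by
    rw [show (0xFFFFFFFF : Int) = ((4294967295 : ℕ) : Int) from rfl]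
    rw [PySem.Int.bxor_natCast]
    rw [show (4294967295 : ℕ) = 2 ^ 32 - 1 from rfl]
    rw [xor_mask 32 r hr_lt]
  rw [hxor]
  have hnot : Int.not ((2 ^ 32 - 1 - r : ℕ) : Int) = -(((2 ^ 32 - 1 - r : ℕ) : Int)) - 1 := by
    rw [show Int.not ((2 ^ 32 - 1 - r : ℕ) : Int) = Int.negSucc (2 ^ 32 - 1 - r) from rfl,
      Int.negSucc_eq]
    ring
  rw [hnot]
  split_ifs with h1 <;> omega
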